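-- pv_equiv track=rewrite | github.com/onkartibe/ioc-searches-challange | app/service.py | _validate_tags
-- ===== SOURCE A (Python) =====
-- from typing import List, Optional
--
-- def _validate_tags(tags: Optional[List[str]]) -> List[str]:
--     """
--     Validate and clean tags.
--     """
--     if tags is None:
--         return []
--     if not isinstance(tags, list):
--         raise ValueError("Tags must be a list of non-empty strings.")
--     cleaned = [t.strip() for t in tags if isinstance(t, str) and t.strip()]
--     if len(cleaned) != len(tags):
--         raise ValueError("All tags must be non-empty strings.")
--     return cleaned
-- ===== SOURCE B (Python) =====
-- from typing import List, Optional
--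
-- def _validate_tags(tags: Optional[List[str]]) -> List[str]:
--     if tags is None:
--         return []
--     if not isinstance(tags, list):
--         raise ValueError("Tags must be a list of non-empty strings.")
--     result = []
--     for t in tags:
--         if not isinstance(t, str):
--             raise ValueError("All tags must be non-empty strings.")
--         s = t.strip()
--         if not s:
--             raise ValueError("All tags must be non-empty strings.")
--         result.append(s)
--     return result
-- ===== Notes on version B (the rewrite author's own statement) =====
-- stated objective: alternative
-- what changed: A filters the list with a comprehension and detects invalid tags afterwards by comparing len(cleaned) to len(tags); B validates each tag inline in one explicit loop, raising immediately on an invalid element and appending the stripped tag, so no filtered-list/length comparison exists.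
import Mathlib
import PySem

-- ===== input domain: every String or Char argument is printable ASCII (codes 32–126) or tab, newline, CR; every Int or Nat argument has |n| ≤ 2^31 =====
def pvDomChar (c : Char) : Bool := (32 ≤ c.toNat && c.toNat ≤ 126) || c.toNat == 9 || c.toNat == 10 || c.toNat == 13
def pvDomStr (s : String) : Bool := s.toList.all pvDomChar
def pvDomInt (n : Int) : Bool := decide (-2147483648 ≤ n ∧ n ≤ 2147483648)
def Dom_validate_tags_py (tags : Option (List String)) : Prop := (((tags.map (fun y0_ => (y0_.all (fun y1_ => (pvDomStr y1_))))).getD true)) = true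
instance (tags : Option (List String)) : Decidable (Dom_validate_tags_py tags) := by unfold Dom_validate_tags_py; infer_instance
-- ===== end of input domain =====

-- B replaces A's filter-then-length-check with a single validating loop; return-value
-- equivalence is claimed on Pre_ (inputs where A returns; elsewhere both raise ValueError).
-- ===== PORT A =====
def validate_tags_py (tags : Option (List String)) : List String :=
  match tags with
  | none => []
  | some l =>
    -- cleaned = [t.strip() for t in tags if t.strip()]  (isinstance(t, str) is always true here)
    let cleaned := (l.filter (fun t => PySem.Str.strip t != "")).map (fun t => PySem.Str.strip t)
    -- 'if len(cleaned) != len(tags): raise' is excluded by Pre_; on Pre_ the branch is not taken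
    cleaned

-- ===== PORT B =====
-- B's explicit loop: validate each element, raise (excluded by Pre_) on an empty strip,
-- otherwise append the stripped tag.
def validate_tags_py_alt_go (l : List String) : List String :=
  match l with
  | [] => []
  | t :: rest => PySem.Str.strip t :: validate_tags_py_alt_go rest

def validate_tags_py_alt (tags : Option (List String)) : List String :=
  match tags with
  | none => []
  | some l => validate_tags_py_alt_go l

-- ===== PRECONDITION & SPEC =====
-- Pre_ excludes exactly the inputs where A raises ValueError (some tag strips to empty);
-- B raises there too.
def Pre_validate_tags_py (tags : Option (List String)) : Prop :=
  match tags with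
  | none => True
  | some l => ∀ t ∈ l, PySem.Str.strip t ≠ ""
instance (tags : Option (List String)) : Decidable (Pre_validate_tags_py tags) := by
  unfold Pre_validate_tags_py
  cases tags <;> infer_instance
def pvWitness_validate_tags_py : Option (List String) := some ["a", " b "]

def Spec_validate_tags_py (tags : Option (List String)) (out : List String) : Prop := out = validate_tags_py_alt tags
instance (tags : Option (List String)) (out : List String) : Decidable (Spec_validate_tags_py tags out) := by unfold Spec_validate_tags_py; infer_instance

-- ===== CLAIM (what is proved, stated in full; the proofs are below) =====
def Claim_equal_validate_tags_py : Prop := ∀ (tags : Option (List String)), Dom_validate_tags_py tags → Pre_validate_tags_py tags → Spec_validate_tags_py tags (validate_tags_py tags)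

-- ===== LEMMAS AND PROOFS =====
theorem go_eq_map_strip (l : List String) (h : ∀ t ∈ l, PySem.Str.strip t ≠ "") :
    (l.filter (fun t => PySem.Str.strip t != "")).map (fun t => PySem.Str.strip t)
      = validate_tags_py_alt_go l := by
  induction l with
  | nil => rfl
  | cons t rest ih =>
    have ht : PySem.Str.strip t ≠ "" := h t (List.mem_cons_self ..)
    simp [validate_tags_py_alt_go, ht,
      ih (fun x hx => h x (List.mem_cons_of_mem _ hx))]

-- ===== VERDICT (by name: the statement is the Claim_ definition above) =====
theorem validate_tags_py_spec : Claim_equal_validate_tags_py := by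
  intro tags _ hpre
  unfold Spec_validate_tags_py validate_tags_py validate_tags_py_alt
  cases tags with
  | none => rfl
  | some l => exact go_eq_map_strip l hpre
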